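-- pv_equiv track=rewrite | github.com/applebiter/nico | nico/domain/services/ranking.py | _rank_after
-- ===== SOURCE A (Python) =====
-- def _rank_after(before: str) -> str:
--     """Generate a rank key after the given key."""
--     ALPHABET = 'abcdefghijklmnopqrstuvwxyz'
--
--     # Get the first character of 'before'
--     first_char = before[0]
--     first_idx = ALPHABET.index(first_char)
--
--     if first_idx < len(ALPHABET) - 1:
--         # We can increment toward the end
--         mid_idx = (first_idx + len(ALPHABET)) // 2
--         return ALPHABET[mid_idx]
--     else:
--         # First char is 'z', we need to add a suffix
--         if len(before) > 1:
--             return before[0] + _rank_after(before[1:])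
--         else:
--             # Edge case: before is "z", extend it
--             return ALPHABET[-1] + ALPHABET[len(ALPHABET) // 2]
-- ===== SOURCE B (Python) =====
-- def _rank_after(before: str) -> str:
--     """Generate a rank key after the given key."""
--     ALPHABET = 'abcdefghijklmnopqrstuvwxyz'
--     i = 0
--     while i < len(before) and before[i] == 'z':
--         i += 1
--     if i == len(before):
--         # all characters (possibly zero of them) are 'z': keep them and append the midpoint
--         return before + 'n'
--     idx = ALPHABET.index(before[i])
--     mid = (idx + 26) // 2
--     return before[:i] + ALPHABET[mid]
-- ===== Notes on version B (the rewrite author's own statement) =====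
-- stated objective: simpler
-- what changed: Replaced A's recursion (peel one leading 'z' per call, rebuild by string concatenation) with a single forward scan that finds the first non-'z' position i and returns before[:i] plus one midpoint character (or before + 'n' when all characters are 'z').
import Mathlib
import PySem

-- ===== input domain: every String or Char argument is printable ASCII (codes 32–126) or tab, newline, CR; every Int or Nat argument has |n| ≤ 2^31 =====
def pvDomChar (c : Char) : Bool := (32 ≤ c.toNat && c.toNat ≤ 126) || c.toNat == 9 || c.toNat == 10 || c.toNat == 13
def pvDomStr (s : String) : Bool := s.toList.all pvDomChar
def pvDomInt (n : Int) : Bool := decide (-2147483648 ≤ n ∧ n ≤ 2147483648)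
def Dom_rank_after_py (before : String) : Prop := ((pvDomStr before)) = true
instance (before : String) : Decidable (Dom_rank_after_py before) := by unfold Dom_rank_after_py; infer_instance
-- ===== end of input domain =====

-- B replaces A's self-recursion by one forward scan for the first non-'z' character; equally fast, no recursion.

-- ===== PORT A =====
-- ALPHABET = 'abcdefghijklmnopqrstuvwxyz'
def pvAlpha : List Char :=
  ['a','b','c','d','e','f','g','h','i','j','k','l','m',
   'n','o','p','q','r','s','t','u','v','w','x','y','z']

-- literal transliteration of A on the character list ([] stands for the raising cases,
-- which Pre_ excludes: before[0] IndexError and ALPHABET.index ValueError)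
def rank_after_py_core : List Char → List Char
  | [] => []                                   -- before[0] raises IndexError
  | first_char :: rest =>
    match PySem.List.index? pvAlpha first_char with
    | none => []                               -- ALPHABET.index raises ValueError
    | some first_idx =>
      if first_idx < pvAlpha.length - 1 then
        let mid_idx : Int := PySem.Int.floordiv ((first_idx : Int) + (pvAlpha.length : Int)) 2
        ((PySem.List.pyGet? pvAlpha mid_idx).elim [] fun ch => [ch])
      else
        if rest.length > 0 then
          first_char :: rank_after_py_core rest
        else
          ((PySem.List.pyGet? pvAlpha (-1)).elim [] fun ch => [ch]) ++
          ((PySem.List.pyGet? pvAlpha (PySem.Int.floordiv (pvAlpha.length : Int) 2)).elim [] fun ch => [ch])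

def rank_after_py (before : String) : String := String.ofList (rank_after_py_core before.toList)

-- ===== PORT B =====
-- the while loop 'i = 0; while i < len(before) and before[i] == "z": i += 1'
def pvAltScan : List Char → Nat
  | [] => 0
  | c :: rest => if c = 'z' then pvAltScan rest + 1 else 0

def rank_after_py_alt_core (cs : List Char) : List Char :=
  let i := pvAltScan cs
  if i = cs.length then cs ++ ['n']
  else
    match PySem.List.pyGet? cs (i : Int) with
    | none => []                               -- unreachable: i < len(cs)
    | some c =>
      match PySem.List.index? pvAlpha c with
      | none => []                             -- ALPHABET.index raises ValueError
      | some idx =>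
        PySem.List.slice cs none (some (i : Int)) ++
        ((PySem.List.pyGet? pvAlpha (PySem.Int.floordiv ((idx : Int) + 26) 2)).elim [] fun ch => [ch])

def rank_after_py_alt (before : String) : String := String.ofList (rank_after_py_alt_core before.toList)

-- ===== PRECONDITION & SPEC =====
-- Pre_ excludes exactly the inputs where A raises: the empty string (IndexError on before[0]) and strings
-- whose first non-'z' character is not a lowercase letter a..y (ValueError from ALPHABET.index).
def Pre_rank_after_py (before : String) : Prop :=
  before.toList ≠ [] ∧
  ((before.toList.dropWhile (fun c => c = 'z')).head?.all (fun c => 'a' ≤ c && c ≤ 'y')) = true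
instance (before : String) : Decidable (Pre_rank_after_py before) := by unfold Pre_rank_after_py; infer_instance
def pvWitness_rank_after_py : String := "zcat"

def Spec_rank_after_py (before : String) (out : String) : Prop := out = rank_after_py_alt before
instance (before : String) (out : String) : Decidable (Spec_rank_after_py before out) := by unfold Spec_rank_after_py; infer_instance

-- ===== CLAIM (what is proved, stated in full; the proofs are below) =====
def Claim_equal_rank_after_py : Prop := ∀ (before : String), Dom_rank_after_py before → Pre_rank_after_py before → Spec_rank_after_py before (rank_after_py before)

-- ===== LEMMAS AND PROOFS =====

lemma pv_index_alpha (c : Char) (h1 : 'a' ≤ c) (h2 : c ≤ 'y') :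
    PySem.List.index? pvAlpha c = some (c.toNat - 97) ∧ c.toNat - 97 < 25 := by
  have hl : 97 ≤ c.toNat := h1
  have hu : c.toNat ≤ 121 := h2
  have key : ∀ n, n < 122 → 97 ≤ n → PySem.List.index? pvAlpha (Char.ofNat n) = some (n - 97) := by decide
  have := key c.toNat (by omega) (by omega)
  rw [Char.ofNat_toNat] at this
  exact ⟨this, by omega⟩

lemma pvAltScan_le (cs : List Char) : pvAltScan cs ≤ cs.length := by
  induction cs with
  | nil => simp [pvAltScan]
  | cons c rest ih =>
    by_cases h : c = 'z'
    · simp only [pvAltScan, if_pos h, List.length_cons]; omega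
    · simp [pvAltScan, h]

lemma pvAltScan_get (cs : List Char) :
    cs[pvAltScan cs]? = (cs.dropWhile (fun c => c = 'z')).head? := by
  induction cs with
  | nil => simp [pvAltScan]
  | cons c rest ih =>
    by_cases h : c = 'z'
    · simp [pvAltScan, h, List.dropWhile_cons_of_pos, ih]
    · simp [pvAltScan, h, List.dropWhile_cons_of_neg]

lemma pv_altcore_cons_z (rest : List Char)
    (hgood : ((rest.dropWhile (fun c => c = 'z')).head?.all (fun c => 'a' ≤ c && c ≤ 'y')) = true) :
    rank_after_py_alt_core ('z' :: rest) = 'z' :: rank_after_py_alt_core rest := by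
  unfold rank_after_py_alt_core
  have hs : pvAltScan ('z' :: rest) = pvAltScan rest + 1 := by simp [pvAltScan]
  by_cases h : pvAltScan rest = rest.length
  · simp [hs, h]
  · have h' : ¬ (pvAltScan rest + 1 = rest.length + 1) := by omega
    have hi : pvAltScan rest < rest.length := lt_of_le_of_ne (pvAltScan_le rest) h
    obtain ⟨c, hc⟩ : ∃ c, rest[pvAltScan rest]? = some c :=
      ⟨rest[pvAltScan rest], List.getElem?_eq_getElem hi⟩
    have hd := pvAltScan_get rest
    rw [hc] at hd
    rw [← hd] at hgood
    simp only [Option.all_some, Bool.and_eq_true, decide_eq_true_eq] at hgood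
    obtain ⟨hidx, -⟩ := pv_index_alpha c hgood.1 hgood.2
    rw [PySem.List.index?_eq_idxOf?] at hidx
    simp only [hs, List.length_cons, if_neg h, if_neg h', Nat.cast_add, Nat.cast_one]
    rw [show ((pvAltScan rest : Int) + 1) = (((pvAltScan rest + 1 : Nat)) : Int) by push_cast; ring]
    rw [PySem.List.pyGet?_natCast, PySem.List.pyGet?_natCast,
        PySem.List.slice_to_natCast, PySem.List.slice_to_natCast]
    simp [hc, hidx]

lemma pv_core_eq (cs : List Char)
    (h0 : cs ≠ [])
    (h1 : ((cs.dropWhile (fun c => c = 'z')).head?.all (fun c => 'a' ≤ c && c ≤ 'y')) = true) :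
    rank_after_py_core cs = rank_after_py_alt_core cs := by
  induction cs with
  | nil => exact absurd rfl h0
  | cons c rest ih =>
    by_cases hz : c = 'z'
    · subst hz
      by_cases hr : rest = []
      · subst hr; decide
      · rw [List.dropWhile_cons_of_pos (by simp)] at h1
        rw [pv_altcore_cons_z rest h1, ← ih hr h1]
        have hlen : rest.length > 0 := List.length_pos_of_ne_nil hr
        have hz25 : List.idxOf? 'z' pvAlpha = some 25 := by decide
        have hlen26 : pvAlpha.length = 26 := by decide
        simp [rank_after_py_core, hz25, hlen26, hlen]
    · rw [List.dropWhile_cons_of_neg (by simp [hz])] at h1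
      simp only [List.head?_cons, Option.all_some, Bool.and_eq_true, decide_eq_true_eq] at h1
      obtain ⟨hidx, hlt⟩ := pv_index_alpha c h1.1 h1.2
      have hidx' := hidx
      rw [PySem.List.index?_eq_idxOf?] at hidx'
      simp only [pvAlpha] at hidx'
      unfold rank_after_py_core rank_after_py_alt_core
      simp only [pvAltScan, if_neg hz, hidx]
      rw [PySem.List.pyGet?_natCast (n := 0), PySem.List.slice_to_natCast (b := 0)]
      simp [hidx', hlt, pvAlpha]

-- ===== VERDICT (by name: the statement is the Claim_ definition above) =====
theorem rank_after_py_spec : Claim_equal_rank_after_py := by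
  intro before _ hpre
  unfold Spec_rank_after_py rank_after_py rank_after_py_alt
  exact congrArg String.ofList (pv_core_eq before.toList hpre.1 hpre.2)
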